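-- pv_equiv track=rewrite | github.com/npont/ML_Sentiment_Analysis | preprocessing.py | emoji_transformation
-- ===== SOURCE A (Python) =====
-- def emoji_transformation(tweet):
--     """
--     Function:
--             replaces emoticons/smileys by tags. For e.g, <3 will be replaced by <heart>
--     Input:
--             tweet as string
--     Output:
--             transformed tweet as string
--     """
--
--     #Possible emoticons_Construction:
--     hearts = ["<3", "♥"]
--     eyes = ["8",":","=",";"]
--     nose = ["'","`","-",r"\\"]
--     smiley = []
--     sadfaces = []
--     neutralfaces = []
--     funnyfaces = []
--
--     for e in eyes:
--         for n in nose: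
--             for s in ["\)", "d", "]", "}"]:
--                 smiley.append(e+n+s)
--                 smiley.append(e+s)
--             for s in ["\(", "\[", "{"]:
--                 sadfaces.append(e+n+s)
--                 sadfaces.append(e+s)
--             for s in ["\|", "\/", r"\\"]:
--                 neutralfaces.append(e+n+s)
--                 neutralfaces.append(e+s)
--             #emoji in other sense (e.g, :-) can also be found as (-: )
--             for s in ["\(", "\[", "{"]:
--                 smiley.append(s+n+e)
--                 smiley.append(s+e)
--             for s in ["\)", "\]", "}"]:
--                 sadfaces.append(s+n+e)
--                 sadfaces.append(s+e)
--             for s in ["\|", "\/", r"\\"]: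
--                 neutralfaces.append(s+n+e)
--                 neutralfaces.append(s+e)
--             funnyfaces.append(e+n+"p")
--             funnyfaces.append(e+"p")
--
--     smiley = set(smiley)
--     sadfaces = set(sadfaces)
--     neutralfaces = set(neutralfaces)
--     funnyfaces = set(funnyfaces)
--
--     t = []
--     for w in tweet.split():
--         if(w in hearts):
--             t.append("<heart>")
--         elif(w in smiley):
--             t.append("<smile>")
--         elif(w in funnyfaces):
--             t.append("<funnyface>")
--         elif(w in neutralfaces):
--             t.append("<neutralface>")
--         elif(w in sadfaces):
--             t.append("<sadface>")
--         else:
--             t.append(w)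
--     return (" ".join(t)).strip()
-- ===== SOURCE B (Python) =====
-- def emoji_transformation(tweet):
--     """
--     Function:
--             replaces emoticons/smileys by tags. For e.g, <3 will be replaced by <heart>
--     Input:
--             tweet as string
--     Output:
--             transformed tweet as string
--     """
--     # Recognize each word by parsing its shape (eye [nose] mouth, or mouth [nose] eye)
--     # instead of pre-generating every emoticon string.
--     return " ".join(_tag(w) for w in tweet.split()).strip()
--
--
-- EYES = "8:=;"
-- NOSES = ("'", "`", "-", "\\\\")
--
-- TABLE = (
--     ("<smile>", ("\\)", "d", "]", "}"), ("\\(", "\\[", "{")),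
--     ("<funnyface>", ("p",), ()),
--     ("<neutralface>", ("\\|", "\\/", "\\\\"), ("\\|", "\\/", "\\\\")),
--     ("<sadface>", ("\\(", "\\[", "{"), ("\\)", "\\]", "}")),
-- )
--
--
-- def _match_fwd(w, mouths):
--     # does w parse as  eye [nose] mouth ?
--     if not w or w[0] not in EYES:
--         return False
--     rest = w[1:]
--     if rest in mouths:
--         return True
--     for n in NOSES:
--         if rest.startswith(n) and rest[len(n):] in mouths:
--             return True
--     return False
--
--
-- def _match_rev(w, mouths):
--     # does w parse as  mouth [nose] eye ?
--     if not w or w[-1] not in EYES: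
--         return False
--     for m in mouths:
--         if w.startswith(m):
--             mid = w[len(m):-1]
--             if mid == "" or mid in NOSES:
--                 return True
--     return False
--
--
-- def _tag(w):
--     if w == "<3" or w == "\u2665":
--         return "<heart>"
--     for tag, fwd, rev in TABLE:
--         if _match_fwd(w, fwd) or _match_rev(w, rev):
--             return tag
--     return w
-- ===== Notes on version B (the rewrite author's own statement) =====
-- stated objective: alternative
-- what changed: B classifies each word by parsing its shape (eye + optional nose + mouth, or mouth + optional nose + eye) with a constant-size recognizer instead of pre-generating all ~300 emoticon strings into five sets and testing membership.
import Mathlib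
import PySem

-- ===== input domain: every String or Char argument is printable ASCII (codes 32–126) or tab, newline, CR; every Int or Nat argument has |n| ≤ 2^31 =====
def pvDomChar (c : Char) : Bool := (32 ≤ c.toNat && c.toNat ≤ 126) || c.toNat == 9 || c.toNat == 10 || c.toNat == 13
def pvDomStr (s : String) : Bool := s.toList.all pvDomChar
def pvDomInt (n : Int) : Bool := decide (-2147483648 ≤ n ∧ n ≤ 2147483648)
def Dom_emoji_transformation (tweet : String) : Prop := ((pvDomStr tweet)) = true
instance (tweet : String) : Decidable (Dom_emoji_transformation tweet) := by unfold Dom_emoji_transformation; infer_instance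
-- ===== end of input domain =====

-- B recognizes each word by PARSING its shape (eye [nose] mouth, or mouth [nose] eye)
-- instead of pre-generating every emoticon string into sets; alternative algorithm.

-- ===== PORT A =====
-- A-side helper: the four pattern lists (smiley, sadfaces, neutralfaces, funnyfaces)
-- built by A's triple-nested append loops, in A's exact append order.
def pvA_lists : List String × List String × List String × List String :=
  ["8", ":", "=", ";"].foldl (fun st e =>
    ["'", "`", "-", "\\\\"].foldl (fun st n =>
      let sm := ["\\)", "d", "]", "}"].foldl (fun sm s => sm ++ [e ++ n ++ s] ++ [e ++ s]) st.1
      let sad := ["\\(", "\\[", "{"].foldl (fun sad s => sad ++ [e ++ n ++ s] ++ [e ++ s]) st.2.1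
      let neu := ["\\|", "\\/", "\\\\"].foldl (fun neu s => neu ++ [e ++ n ++ s] ++ [e ++ s]) st.2.2.1
      let sm := ["\\(", "\\[", "{"].foldl (fun sm s => sm ++ [s ++ n ++ e] ++ [s ++ e]) sm
      let sad := ["\\)", "\\]", "}"].foldl (fun sad s => sad ++ [s ++ n ++ e] ++ [s ++ e]) sad
      let neu := ["\\|", "\\/", "\\\\"].foldl (fun neu s => neu ++ [s ++ n ++ e] ++ [s ++ e]) neu
      let fn := st.2.2.2 ++ [e ++ n ++ "p"] ++ [e ++ "p"]
      (sm, sad, neu, fn)) st) ([], [], [], [])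

def emoji_transformation (tweet : String) : String :=
  let hearts : List String := ["<3", "♥"]
  let smiley : PySem.Set String := PySem.Set.ofList pvA_lists.1
  let sadfaces : PySem.Set String := PySem.Set.ofList pvA_lists.2.1
  let neutralfaces : PySem.Set String := PySem.Set.ofList pvA_lists.2.2.1
  let funnyfaces : PySem.Set String := PySem.Set.ofList pvA_lists.2.2.2
  let t : List String := (PySem.Str.split₀ tweet).foldl (fun t w =>
      if hearts.contains w then t ++ ["<heart>"]
      else if PySem.Set.contains smiley w then t ++ ["<smile>"]
      else if PySem.Set.contains funnyfaces w then t ++ ["<funnyface>"]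
      else if PySem.Set.contains neutralfaces w then t ++ ["<neutralface>"]
      else if PySem.Set.contains sadfaces w then t ++ ["<sadface>"]
      else t ++ [w]) []
  PySem.Str.strip (PySem.Str.join " " t)

-- ===== PORT B =====
-- B-side helpers: literal transcription of Source B's parser. Python's per-word string
-- ops (w[0], w[1:], startswith, w[len(m):-1]) are ported on w.toList, where they are
-- exact: index 0 after a nonemptiness test, slices = drop/dropLast, startswith = isPrefixOf.
def pvEYES : List Char := "8:=;".toList
def pvNOSES : List (List Char) := [['\''], ['`'], ['-'], ['\\', '\\']]
def pvTABLE : List (String × List (List Char) × List (List Char)) :=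
  [("<smile>", [['\\', ')'], ['d'], [']'], ['}']], [['\\', '('], ['\\', '['], ['{']]),
   ("<funnyface>", [['p']], []),
   ("<neutralface>", [['\\', '|'], ['\\', '/'], ['\\', '\\']], [['\\', '|'], ['\\', '/'], ['\\', '\\']]),
   ("<sadface>", [['\\', '('], ['\\', '['], ['{']], [['\\', ')'], ['\\', ']'], ['}']])]

-- does w parse as  eye [nose] mouth ?  (Source B _match_fwd)
def pvMatchFwd (cs : List Char) (mouths : List (List Char)) : Bool :=
  match cs with
  | [] => false
  | e :: rest =>
    pvEYES.contains e &&
      (mouths.contains rest ||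
       pvNOSES.any (fun n => n.isPrefixOf rest && mouths.contains (rest.drop n.length)))

-- does w parse as  mouth [nose] eye ?  (Source B _match_rev)
def pvMatchRev (cs : List Char) (mouths : List (List Char)) : Bool :=
  match cs.getLast? with
  | none => false
  | some e =>
    pvEYES.contains e &&
      mouths.any (fun m => m.isPrefixOf cs &&
        (let mid := (cs.drop m.length).dropLast
         mid.isEmpty || pvNOSES.contains mid))

-- Source B _tag: loop over TABLE with early return = findSome?
def pvTag (w : String) : String :=
  if w = "<3" ∨ w = "♥" then "<heart>"
  else
    ((pvTABLE.findSome? (fun t =>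
        if pvMatchFwd w.toList t.2.1 || pvMatchRev w.toList t.2.2 then some t.1 else none)).getD w)

def emoji_transformation_alt (tweet : String) : String :=
  PySem.Str.strip (PySem.Str.join " " ((PySem.Str.split₀ tweet).map pvTag))

-- ===== PRECONDITION & SPEC =====
def Spec_emoji_transformation (tweet : String) (out : String) : Prop := out = emoji_transformation_alt tweet
instance (tweet : String) (out : String) : Decidable (Spec_emoji_transformation tweet out) := by unfold Spec_emoji_transformation; infer_instance

-- ===== CLAIM (what is proved, stated in full; the proofs are below) =====
def Claim_equal_emoji_transformation : Prop := ∀ (tweet : String), Dom_emoji_transformation tweet → Spec_emoji_transformation tweet (emoji_transformation tweet)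

-- ===== LEMMAS AND PROOFS =====
set_option maxRecDepth 16000
set_option maxHeartbeats 2000000

-- The full language each parser accepts, as an explicit list of char lists.
def pvKeyFwd (F : List (List Char)) : List (List Char) :=
  pvEYES.flatMap (fun e => (([] : List Char) :: pvNOSES).flatMap (fun n => F.map (fun s => e :: (n ++ s))))
def pvKeyRev (R : List (List Char)) : List (List Char) :=
  R.flatMap (fun m => (([] : List Char) :: pvNOSES).flatMap (fun n => pvEYES.map (fun e => m ++ n ++ [e])))

-- the same languages at the String level (for the decidable comparisons with A's lists)
def pvKeyFwdS (F : List String) : List String :=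
  ["8", ":", "=", ";"].flatMap (fun e => ("" :: ["'", "`", "-", "\\\\"]).flatMap (fun n => F.map (fun s => e ++ n ++ s)))
def pvKeyRevS (R : List String) : List String :=
  R.flatMap (fun m => ("" :: ["'", "`", "-", "\\\\"]).flatMap (fun n => ["8", ":", "=", ";"].map (fun e => m ++ n ++ e)))

def pvSmS : List String := pvKeyFwdS ["\\)", "d", "]", "}"] ++ pvKeyRevS ["\\(", "\\[", "{"]
def pvFnS : List String := pvKeyFwdS ["p"] ++ pvKeyRevS []
def pvNeS : List String := pvKeyFwdS ["\\|", "\\/", "\\\\"] ++ pvKeyRevS ["\\|", "\\/", "\\\\"]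
def pvSadS : List String := pvKeyFwdS ["\\(", "\\[", "{"] ++ pvKeyRevS ["\\)", "\\]", "}"]

theorem pv_fwd_mem (cs : List Char) (F : List (List Char)) :
    pvMatchFwd cs F = true ↔ cs ∈ pvKeyFwd F := by
  cases cs with
  | nil => simp [pvMatchFwd, pvKeyFwd]
  | cons e rest =>
    simp only [pvMatchFwd, pvKeyFwd, Bool.and_eq_true, Bool.or_eq_true, List.any_eq_true,
      List.mem_flatMap, List.mem_map, List.contains_iff_mem, List.mem_cons]
    constructor
    · rintro ⟨he, hrest | ⟨n, hn, hpre, hc⟩⟩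
      · exact ⟨e, he, [], Or.inl rfl, rest, hrest, by simp⟩
      · rw [List.isPrefixOf_iff_prefix] at hpre
        obtain ⟨t, rfl⟩ := hpre
        rw [List.drop_left] at hc
        exact ⟨e, he, n, Or.inr hn, t, hc, rfl⟩
    · rintro ⟨e', he', n, hn, s, hs, heq⟩
      obtain ⟨rfl, hre⟩ : e' = e ∧ n ++ s = rest := by simpa using heq
      subst hre
      refine ⟨he', ?_⟩
      rcases hn with rfl | hn
      · exact Or.inl (by simpa using hs)
      · refine Or.inr ⟨n, hn, ?_, ?_⟩
        · rw [List.isPrefixOf_iff_prefix]; exact ⟨s, rfl⟩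
        · rw [List.drop_left]; exact hs

theorem pv_rev_mem (cs : List Char) (R : List (List Char))
    (hR : ∀ m ∈ R, ∀ e ∈ pvEYES, m.getLast? ≠ some e) :
    pvMatchRev cs R = true ↔ cs ∈ pvKeyRev R := by
  unfold pvMatchRev
  cases h : cs.getLast? with
  | none =>
    rw [List.getLast?_eq_none_iff] at h
    subst h
    simp [pvKeyRev]
  | some e =>
    simp only [Bool.and_eq_true, List.any_eq_true, pvKeyRev, List.mem_flatMap, List.mem_map,
      List.mem_cons, List.isEmpty_iff, Bool.or_eq_true, List.contains_iff_mem]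
    constructor
    · rintro ⟨he, m, hm, hp, hmid⟩
      rw [List.isPrefixOf_iff_prefix] at hp
      obtain ⟨t, rfl⟩ := hp
      rw [List.drop_left] at hmid
      rcases eq_or_ne t [] with rfl | ht
      · exfalso
        simp only [List.append_nil] at h
        exact hR m hm e he h
      · have hlast : t.getLast? = some e := by
          rwa [List.getLast?_append_of_ne_nil _ ht] at h
        obtain ⟨t', rfl⟩ := List.getLast?_eq_some_iff.mp hlast
        refine ⟨m, hm, t', ?_, e, he, by simp⟩
        rcases hmid with h0 | hmem
        · rw [List.dropLast_concat] at h0; exact Or.inl h0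
        · rw [List.dropLast_concat] at hmem; exact Or.inr hmem
    · rintro ⟨m, hm, n, hn, e', he', heq⟩
      subst heq
      obtain rfl : e' = e := by
        rw [List.append_assoc, List.getLast?_append_of_ne_nil _ (by simp : n ++ [e'] ≠ []),
          List.getLast?_append_of_ne_nil _ (by simp : [e'] ≠ ([] : List Char))] at h
        simpa using h
      refine ⟨he', m, hm, ?_, ?_⟩
      · rw [List.isPrefixOf_iff_prefix, List.append_assoc]
        exact ⟨n ++ [e'], rfl⟩
      · rw [List.append_assoc, List.drop_left, List.dropLast_concat]
        rcases hn with rfl | hn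
        · exact Or.inl rfl
        · exact Or.inr hn

-- membership transfer String ↔ List Char
theorem pv_mem_map_toList (L : List String) (w : String) :
    w ∈ L ↔ w.toList ∈ L.map String.toList := by
  rw [List.mem_map]
  exact ⟨fun h => ⟨w, h, rfl⟩, fun ⟨v, hv, hvw⟩ => (String.toList_inj.mp hvw) ▸ hv⟩

-- two closed lists with the same members
theorem pv_mem_iff_of_all {α : Type} [BEq α] [LawfulBEq α] {L1 L2 : List α}
    (h1 : L1.all (L2.contains ·) = true) (h2 : L2.all (L1.contains ·) = true)
    (w : α) : w ∈ L1 ↔ w ∈ L2 := by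
  simp only [List.all_eq_true, List.contains_iff_mem] at h1 h2
  exact ⟨fun h => h1 w h, fun h => h2 w h⟩

-- the String-level languages are the char-level ones (closed computations)
theorem pvBrSm : pvSmS.map String.toList = pvKeyFwd [['\\', ')'], ['d'], [']'], ['}']] ++ pvKeyRev [['\\', '('], ['\\', '['], ['{']] := by decide
theorem pvBrFn : pvFnS.map String.toList = pvKeyFwd [['p']] ++ pvKeyRev [] := by decide
theorem pvBrNe : pvNeS.map String.toList = pvKeyFwd [['\\', '|'], ['\\', '/'], ['\\', '\\']] ++ pvKeyRev [['\\', '|'], ['\\', '/'], ['\\', '\\']] := by decide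
theorem pvBrSad : pvSadS.map String.toList = pvKeyFwd [['\\', '('], ['\\', '['], ['{']] ++ pvKeyRev [['\\', ')'], ['\\', ']'], ['}']] := by decide

-- A's generated category lists have the same members as B's parser languages
theorem pvSm1 : pvA_lists.1.all (pvSmS.contains ·) = true := by decide
theorem pvSm2 : pvSmS.all (pvA_lists.1.contains ·) = true := by decide
theorem pvSad1 : pvA_lists.2.1.all (pvSadS.contains ·) = true := by decide
theorem pvSad2 : pvSadS.all (pvA_lists.2.1.contains ·) = true := by decide
theorem pvNe1 : pvA_lists.2.2.1.all (pvNeS.contains ·) = true := by decide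
theorem pvNe2 : pvNeS.all (pvA_lists.2.2.1.contains ·) = true := by decide
theorem pvFn1 : pvA_lists.2.2.2.all (pvFnS.contains ·) = true := by decide
theorem pvFn2 : pvFnS.all (pvA_lists.2.2.2.contains ·) = true := by decide

-- no reversed mouth ends in an eye character (side condition of pv_rev_mem)
theorem pv_revok_of_bool {R : List (List Char)}
    (h : R.all (fun m => pvEYES.all (fun e => !(m.getLast? == some e))) = true) :
    ∀ m ∈ R, ∀ e ∈ pvEYES, m.getLast? ≠ some e := by
  simp only [List.all_eq_true, Bool.not_eq_true', beq_eq_false_iff_ne, ne_eq] at h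
  exact fun m hm e he => h m hm e he
theorem pvRevOkSm : ∀ m ∈ [['\\', '('], ['\\', '['], ['{']], ∀ e ∈ pvEYES, List.getLast? m ≠ some e :=
  pv_revok_of_bool (by decide)
theorem pvRevOkFn : ∀ m ∈ ([] : List (List Char)), ∀ e ∈ pvEYES, List.getLast? m ≠ some e :=
  pv_revok_of_bool (by decide)
theorem pvRevOkNe : ∀ m ∈ [['\\', '|'], ['\\', '/'], ['\\', '\\']], ∀ e ∈ pvEYES, List.getLast? m ≠ some e :=
  pv_revok_of_bool (by decide)
theorem pvRevOkSad : ∀ m ∈ [['\\', ')'], ['\\', ']'], ['}']], ∀ e ∈ pvEYES, List.getLast? m ≠ some e :=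
  pv_revok_of_bool (by decide)

-- per-category: A's set test = B's parser test
theorem pv_cat (w : String) (AL KS : List String) (F R : List (List Char))
    (hR : ∀ m ∈ R, ∀ e ∈ pvEYES, List.getLast? m ≠ some e)
    (hb : KS.map String.toList = pvKeyFwd F ++ pvKeyRev R)
    (h1 : AL.all (KS.contains ·) = true) (h2 : KS.all (AL.contains ·) = true) :
    PySem.Set.contains (PySem.Set.ofList AL) w = (pvMatchFwd w.toList F || pvMatchRev w.toList R) := by
  have hmem : w ∈ AL ↔ (pvMatchFwd w.toList F || pvMatchRev w.toList R) = true := by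
    rw [pv_mem_iff_of_all h1 h2 w, pv_mem_map_toList KS w, hb, List.mem_append,
      ← pv_fwd_mem, ← pv_rev_mem _ _ hR, ← Bool.or_eq_true]
  by_cases h : w ∈ AL
  · have := hmem.mp h
    simp [PySem.Set.mem_ofList, h, this]
  · have : (pvMatchFwd w.toList F || pvMatchRev w.toList R) = false := by
      rcases Bool.eq_false_or_eq_true (pvMatchFwd w.toList F || pvMatchRev w.toList R) with ht | hf
      · exact absurd (hmem.mpr ht) h
      · exact hf
    simp [PySem.Set.mem_ofList, h, this]

-- per-word agreement: A's if/elif ladder = B's _tag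
theorem pv_word (w : String) :
    (if (["<3", "♥"] : List String).contains w then "<heart>"
     else if PySem.Set.contains (PySem.Set.ofList pvA_lists.1) w then "<smile>"
     else if PySem.Set.contains (PySem.Set.ofList pvA_lists.2.2.2) w then "<funnyface>"
     else if PySem.Set.contains (PySem.Set.ofList pvA_lists.2.2.1) w then "<neutralface>"
     else if PySem.Set.contains (PySem.Set.ofList pvA_lists.2.1) w then "<sadface>"
     else w)
    = pvTag w := by
  unfold pvTag
  rw [pv_cat w pvA_lists.1 pvSmS _ _ pvRevOkSm pvBrSm pvSm1 pvSm2,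
      pv_cat w pvA_lists.2.2.2 pvFnS _ _ pvRevOkFn pvBrFn pvFn1 pvFn2,
      pv_cat w pvA_lists.2.2.1 pvNeS _ _ pvRevOkNe pvBrNe pvNe1 pvNe2,
      pv_cat w pvA_lists.2.1 pvSadS _ _ pvRevOkSad pvBrSad pvSad1 pvSad2]
  simp only [pvTABLE, List.findSome?_cons, List.findSome?_nil, List.contains_eq_mem,
    List.mem_cons, List.not_mem_nil, or_false, decide_eq_true_eq]
  split_ifs <;> simp_all

-- A's word loop is B's map.
theorem pvA_map (tweet : String) :
    emoji_transformation tweet = emoji_transformation_alt tweet := by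
  unfold emoji_transformation emoji_transformation_alt
  dsimp only
  have hf : (fun (t : List String) (w : String) =>
      if (["<3", "♥"] : List String).contains w then t ++ ["<heart>"]
      else if PySem.Set.contains (PySem.Set.ofList pvA_lists.1) w then t ++ ["<smile>"]
      else if PySem.Set.contains (PySem.Set.ofList pvA_lists.2.2.2) w then t ++ ["<funnyface>"]
      else if PySem.Set.contains (PySem.Set.ofList pvA_lists.2.2.1) w then t ++ ["<neutralface>"]
      else if PySem.Set.contains (PySem.Set.ofList pvA_lists.2.1) w then t ++ ["<sadface>"]
      else t ++ [w])
      = fun t w => t ++ [pvTag w] := by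
    funext t w
    rw [← pv_word w]
    split_ifs <;> rfl
  rw [hf, PySem.List.foldl_append_singleton_eq_map, List.nil_append]

-- ===== VERDICT (by name: the statement is the Claim_ definition above) =====
theorem emoji_transformation_spec : Claim_equal_emoji_transformation := by
  intro tweet _
  unfold Spec_emoji_transformation
  exact pvA_map tweet
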